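-- pv_equiv track=rewrite | github.com/firekg/is-it-optimal | RL/Generate.py | Gen_Superset
-- ===== SOURCE A (Python) =====
-- import copy
--
-- def Gen_Superset(number_of_features, number_of_labels):
--       if number_of_features == 1:
--             lst = []
--             for lb in range(number_of_labels):
--                   hypo = []
--                   hypo.append(lb)
--                   lst.append(hypo)
--             return lst
--       else:
--             temp_list = Gen_Superset(number_of_features - 1, number_of_labels)
--             return_lst = []
--             for hypos in temp_list:
--                   for lb in range(number_of_labels):
--                         temp_hypo = copy.deepcopy(hypos)
--                         temp_hypo.append(lb)
--                         return_lst.append(temp_hypo)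
--             return return_lst
-- ===== SOURCE B (Python) =====
-- def Gen_Superset(number_of_features, number_of_labels):
--     result = [[]]
--     for _ in range(number_of_features):
--         result = [h + [lb] for h in result for lb in range(number_of_labels)]
--     return result
-- ===== Notes on version B (the rewrite author's own statement) =====
-- stated objective: simpler
-- what changed: Replaces the deepcopy-based recursion with an iterative accumulator: start from [[]] and extend every prefix by each label, number_of_features times.
import Mathlib
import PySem

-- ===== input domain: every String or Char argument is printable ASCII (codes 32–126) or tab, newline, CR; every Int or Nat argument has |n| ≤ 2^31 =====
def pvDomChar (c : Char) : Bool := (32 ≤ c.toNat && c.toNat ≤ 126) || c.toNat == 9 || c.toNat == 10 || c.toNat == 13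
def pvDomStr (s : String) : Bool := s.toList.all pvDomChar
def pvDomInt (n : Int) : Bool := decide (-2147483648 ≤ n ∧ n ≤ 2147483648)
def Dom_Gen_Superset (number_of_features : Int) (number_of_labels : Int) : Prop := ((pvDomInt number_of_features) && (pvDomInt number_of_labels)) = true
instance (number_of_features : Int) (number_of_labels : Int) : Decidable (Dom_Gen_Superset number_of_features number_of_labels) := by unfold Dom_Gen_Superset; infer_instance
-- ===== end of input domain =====

-- B replaces A's deepcopy-based recursion with an iterative accumulator (simpler, same cost);
-- equivalence is claimed for number_of_features ≥ 1 (A recurses forever otherwise).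

-- ===== PORT A =====
-- Literal port of A's recursion. For number_of_features ≤ 0 the Python recursion never
-- terminates (RecursionError); that region is outside Pre_ and the port returns [] there
-- (totality guard only).
def Gen_Superset (number_of_features : Int) (number_of_labels : Int) : List (List Int) :=
  if number_of_features == 1 then
    -- lst = []; for lb in range(number_of_labels): hypo = []; hypo.append(lb); lst.append(hypo)
    (PySem.List.pyRange 0 number_of_labels 1).foldl (fun lst lb => lst ++ [[lb]]) []
  else if number_of_features ≤ 0 then []   -- Python diverges here (outside Pre_)
  else
    let temp_list := Gen_Superset (number_of_features - 1) number_of_labels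
    temp_list.foldl (fun return_lst hypos =>
      (PySem.List.pyRange 0 number_of_labels 1).foldl
        (fun return_lst lb => return_lst ++ [hypos ++ [lb]]) return_lst) []
termination_by number_of_features.toNat
decreasing_by omega

-- ===== PORT B =====
-- result = [[]]; for _ in range(number_of_features): result = [h + [lb] for h in result for lb in range(number_of_labels)]
def Gen_Superset_alt (number_of_features : Int) (number_of_labels : Int) : List (List Int) :=
  (List.range number_of_features.toNat).foldl
    (fun result _ =>
      result.flatMap (fun h => (PySem.List.pyRange 0 number_of_labels 1).map (fun lb => h ++ [lb])))
    [[]]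

-- ===== PRECONDITION & SPEC =====
-- Pre_ excludes number_of_features ≤ 0, where the Python A recurses without a base case (RecursionError).
def Pre_Gen_Superset (number_of_features : Int) (number_of_labels : Int) : Prop :=
  1 ≤ number_of_features
instance (number_of_features : Int) (number_of_labels : Int) : Decidable (Pre_Gen_Superset number_of_features number_of_labels) := by unfold Pre_Gen_Superset; infer_instance
def pvWitness_Gen_Superset : Int × Int := (2, 2)

def Spec_Gen_Superset (number_of_features : Int) (number_of_labels : Int) (out : List (List Int)) : Prop := out = Gen_Superset_alt number_of_features number_of_labels
instance (number_of_features : Int) (number_of_labels : Int) (out : List (List Int)) : Decidable (Spec_Gen_Superset number_of_features number_of_labels out) := by unfold Spec_Gen_Superset; infer_instance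

-- ===== CLAIM (what is proved, stated in full; the proofs are below) =====
def Claim_equal_Gen_Superset : Prop := ∀ (number_of_features : Int) (number_of_labels : Int), Dom_Gen_Superset number_of_features number_of_labels → Pre_Gen_Superset number_of_features number_of_labels → Spec_Gen_Superset number_of_features number_of_labels (Gen_Superset number_of_features number_of_labels)

-- ===== LEMMAS AND PROOFS =====

-- one step of B's loop
def pvStep (number_of_labels : Int) (res : List (List Int)) : List (List Int) :=
  res.flatMap (fun h => (PySem.List.pyRange 0 number_of_labels 1).map (fun lb => h ++ [lb]))

-- A's inner double loop is pvStep of the recursive result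
lemma genA_loop_eq_step (nl : Int) (temp : List (List Int)) (acc : List (List Int)) :
    temp.foldl (fun return_lst hypos =>
      (PySem.List.pyRange 0 nl 1).foldl
        (fun return_lst lb => return_lst ++ [hypos ++ [lb]]) return_lst) acc
    = acc ++ pvStep nl temp := by
  induction temp generalizing acc with
  | nil => simp [pvStep]
  | cons h t ih =>
      rw [List.foldl_cons, ih]
      rw [PySem.List.foldl_append_singleton_eq_map]
      simp [pvStep]

-- B's fold is iteration of pvStep
lemma genB_eq_iterate (nl : Int) (k : Nat) :
    (List.range k).foldl (fun result _ => pvStep nl result) [[]]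
    = (pvStep nl)^[k] [[]] := by
  induction k with
  | zero => simp
  | succ n ih =>
      rw [List.range_succ, List.foldl_append, ih, List.foldl_cons, List.foldl_nil,
        Function.iterate_succ_apply']

lemma genA_eq_iterate (nf nl : Int) (h : 1 ≤ nf) :
    Gen_Superset nf nl = (pvStep nl)^[nf.toNat] [[]] := by
  have hk : ∃ k : Nat, nf = (k : Int) + 1 := ⟨(nf - 1).toNat, by omega⟩
  obtain ⟨k, rfl⟩ := hk
  clear h
  induction k with
  | zero =>
      rw [Gen_Superset]
      rw [PySem.List.foldl_append_singleton_eq_map]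
      simp [pvStep, List.flatMap]
  | succ n ih =>
      rw [Gen_Superset]
      push_cast
      rw [if_neg (by simp; omega : ¬ (((n : Int) + 1 + 1 == 1) = true)),
        if_neg (by omega : ¬ ((n : Int) + 1 + 1 ≤ 0))]
      have h3 : ((n : Int) + 1 + 1 - 1) = (n : Int) + 1 := by ring
      simp only [h3, genA_loop_eq_step, ih]
      have ht : ((n : Int) + 1 + 1).toNat = ((n : Int) + 1).toNat + 1 := by omega
      rw [ht, Function.iterate_succ_apply']
      simp

-- ===== VERDICT (by name: the statement is the Claim_ definition above) =====
theorem Gen_Superset_spec : Claim_equal_Gen_Superset := by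
  intro nf nl _ hpre
  unfold Spec_Gen_Superset Gen_Superset_alt
  rw [genA_eq_iterate nf nl hpre]
  exact (genB_eq_iterate nl nf.toNat).symm
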